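-- pv_equiv track=rewrite | github.com/anonymousAccountForPublication/reversible_plasticity | incremental deconstruction/PreparePlottingVarCueValidityParallel.py | _apply_marker
-- ===== SOURCE A (Python) =====
-- def _apply_marker(cStarList):
--     marker5 = [idx for idx, val in cStarList if (isinstance(val, tuple) and val == (0, 1))]  # tie between construction
--     marker6 = [idx for idx, val in cStarList if
--                (isinstance(val, tuple) and val == (2, 3))]  # tie between deconstruction
--     marker7 = [idx for idx, val in cStarList if (isinstance(val, tuple) and val == (0, 3))]  # y0C, y1D
--     marker8 = [idx for idx, val in cStarList if (isinstance(val, tuple) and val == (1, 2))]  # y1C,y0D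
--     marker9 = [idx for idx, val in cStarList if (isinstance(val, tuple) and val == (0, 2,4))] #y0, D0, yw
--     marker10 = [idx for idx, val in cStarList if (isinstance(val, tuple) and val == (1, 3,4))] #y1,D1,yw
--     allMarkers = marker5 + marker6 + marker7 + marker8 + marker9 + marker10
--     marker11 = [idx for idx, val in cStarList if
--                (isinstance(val, tuple) and idx not in allMarkers)]  # tie between construction
--     return (marker5, marker6, marker7, marker8, marker9,marker10, marker11)
-- ===== SOURCE B (Python) =====
-- def _apply_marker(cStarList):
--     m5, m6, m7, m8, m9, m10 = [], [], [], [], [], []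
--     matched = set()
--     for idx, val in cStarList:
--         if not isinstance(val, tuple):
--             continue
--         if val == (0, 1):
--             m5.append(idx); matched.add(idx)
--         elif val == (2, 3):
--             m6.append(idx); matched.add(idx)
--         elif val == (0, 3):
--             m7.append(idx); matched.add(idx)
--         elif val == (1, 2):
--             m8.append(idx); matched.add(idx)
--         elif val == (0, 2, 4):
--             m9.append(idx); matched.add(idx)
--         elif val == (1, 3, 4):
--             m10.append(idx); matched.add(idx)
--     m11 = [idx for idx, val in cStarList
--            if isinstance(val, tuple) and idx not in matched]
--     return (m5, m6, m7, m8, m9, m10, m11)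
-- ===== Notes on version B (the rewrite author's own statement) =====
-- stated objective: alternative
-- what changed: Replaces six separate list-comprehension scans plus an 'idx not in allMarkers' list-membership pass with a single classifying pass (if/elif chain appending to one of six lists while recording matched indices in a set) and one set-membership pass for marker11.
import Mathlib
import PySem

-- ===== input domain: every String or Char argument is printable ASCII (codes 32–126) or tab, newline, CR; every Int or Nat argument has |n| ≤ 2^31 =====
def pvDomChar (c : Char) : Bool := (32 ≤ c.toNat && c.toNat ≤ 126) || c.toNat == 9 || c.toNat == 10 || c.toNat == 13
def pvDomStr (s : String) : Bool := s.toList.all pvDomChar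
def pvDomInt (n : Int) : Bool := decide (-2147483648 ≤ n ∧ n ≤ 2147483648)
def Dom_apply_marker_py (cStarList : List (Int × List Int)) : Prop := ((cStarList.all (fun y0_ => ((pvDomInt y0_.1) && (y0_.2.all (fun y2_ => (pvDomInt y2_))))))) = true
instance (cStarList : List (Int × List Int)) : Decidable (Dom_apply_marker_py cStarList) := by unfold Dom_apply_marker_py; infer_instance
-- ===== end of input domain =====

-- B replaces A's six repeated scans plus a list-membership pass by one classifying
-- pass with a matched-index set and one set-membership pass (objective: alternative).
-- Under the type convention every 'val' is a List Int (a tuple), so 'isinstance(val, tuple)' is always true.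

-- ===== PORT A =====
def apply_marker_py (cStarList : List (Int × List Int)) : List (List Int) :=
  let marker5 := cStarList.filterMap (fun p => if p.2 = ([0, 1] : List Int) then some p.1 else none)
  let marker6 := cStarList.filterMap (fun p => if p.2 = ([2, 3] : List Int) then some p.1 else none)
  let marker7 := cStarList.filterMap (fun p => if p.2 = ([0, 3] : List Int) then some p.1 else none)
  let marker8 := cStarList.filterMap (fun p => if p.2 = ([1, 2] : List Int) then some p.1 else none)
  let marker9 := cStarList.filterMap (fun p => if p.2 = ([0, 2, 4] : List Int) then some p.1 else none)
  let marker10 := cStarList.filterMap (fun p => if p.2 = ([1, 3, 4] : List Int) then some p.1 else none)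
  let allMarkers := marker5 ++ marker6 ++ marker7 ++ marker8 ++ marker9 ++ marker10
  let marker11 := cStarList.filterMap (fun p => if p.1 ∈ allMarkers then none else some p.1)
  [marker5, marker6, marker7, marker8, marker9, marker10, marker11]

-- ===== PORT B =====
-- the loop body of Source B's single classifying pass (state: the six lists and the matched-index set)
def pvAltStep
    (st : List Int × List Int × List Int × List Int × List Int × List Int × PySem.Set Int)
    (p : Int × List Int) :
    List Int × List Int × List Int × List Int × List Int × List Int × PySem.Set Int :=
  if p.2 = ([0, 1] : List Int) then (st.1 ++ [p.1], st.2.1, st.2.2.1, st.2.2.2.1, st.2.2.2.2.1, st.2.2.2.2.2.1, PySem.Set.add st.2.2.2.2.2.2 p.1)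
  else if p.2 = ([2, 3] : List Int) then (st.1, st.2.1 ++ [p.1], st.2.2.1, st.2.2.2.1, st.2.2.2.2.1, st.2.2.2.2.2.1, PySem.Set.add st.2.2.2.2.2.2 p.1)
  else if p.2 = ([0, 3] : List Int) then (st.1, st.2.1, st.2.2.1 ++ [p.1], st.2.2.2.1, st.2.2.2.2.1, st.2.2.2.2.2.1, PySem.Set.add st.2.2.2.2.2.2 p.1)
  else if p.2 = ([1, 2] : List Int) then (st.1, st.2.1, st.2.2.1, st.2.2.2.1 ++ [p.1], st.2.2.2.2.1, st.2.2.2.2.2.1, PySem.Set.add st.2.2.2.2.2.2 p.1)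
  else if p.2 = ([0, 2, 4] : List Int) then (st.1, st.2.1, st.2.2.1, st.2.2.2.1, st.2.2.2.2.1 ++ [p.1], st.2.2.2.2.2.1, PySem.Set.add st.2.2.2.2.2.2 p.1)
  else if p.2 = ([1, 3, 4] : List Int) then (st.1, st.2.1, st.2.2.1, st.2.2.2.1, st.2.2.2.2.1, st.2.2.2.2.2.1 ++ [p.1], PySem.Set.add st.2.2.2.2.2.2 p.1)
  else st

def apply_marker_py_alt (cStarList : List (Int × List Int)) : List (List Int) :=
  let st := cStarList.foldl pvAltStep ([], [], [], [], [], [], PySem.Set.empty)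
  let m11 := cStarList.filterMap (fun p => if PySem.Set.contains st.2.2.2.2.2.2 p.1 then none else some p.1)
  [st.1, st.2.1, st.2.2.1, st.2.2.2.1, st.2.2.2.2.1, st.2.2.2.2.2.1, m11]

-- ===== PRECONDITION & SPEC =====
def Spec_apply_marker_py (cStarList : List (Int × List Int)) (out : List (List Int)) : Prop := out = apply_marker_py_alt cStarList
instance (cStarList : List (Int × List Int)) (out : List (List Int)) : Decidable (Spec_apply_marker_py cStarList out) := by unfold Spec_apply_marker_py; infer_instance

-- ===== CLAIM (what is proved, stated in full; the proofs are below) =====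
def Claim_equal_apply_marker_py : Prop := ∀ (cStarList : List (Int × List Int)), Dom_apply_marker_py cStarList → Spec_apply_marker_py cStarList (apply_marker_py cStarList)

-- ===== LEMMAS AND PROOFS =====

-- index of a matching entry, following Source B's elif chain (the six patterns are pairwise distinct lists)
def pvMatchIdx (p : Int × List Int) : Option Int :=
  if p.2 = ([0, 1] : List Int) ∨ p.2 = ([2, 3] : List Int) ∨ p.2 = ([0, 3] : List Int) ∨
     p.2 = ([1, 2] : List Int) ∨ p.2 = ([0, 2, 4] : List Int) ∨ p.2 = ([1, 3, 4] : List Int)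
  then some p.1 else none

set_option maxHeartbeats 1600000 in
lemma pvAltStep_foldl (l : List (Int × List Int))
    (m5 m6 m7 m8 m9 m10 : List Int) (mt : PySem.Set Int) :
    l.foldl pvAltStep (m5, m6, m7, m8, m9, m10, mt) =
      (m5 ++ l.filterMap (fun p => if p.2 = ([0, 1] : List Int) then some p.1 else none),
       m6 ++ l.filterMap (fun p => if p.2 = ([2, 3] : List Int) then some p.1 else none),
       m7 ++ l.filterMap (fun p => if p.2 = ([0, 3] : List Int) then some p.1 else none),
       m8 ++ l.filterMap (fun p => if p.2 = ([1, 2] : List Int) then some p.1 else none),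
       m9 ++ l.filterMap (fun p => if p.2 = ([0, 2, 4] : List Int) then some p.1 else none),
       m10 ++ l.filterMap (fun p => if p.2 = ([1, 3, 4] : List Int) then some p.1 else none),
       PySem.Set.update mt (l.filterMap pvMatchIdx)) := by
  induction l generalizing m5 m6 m7 m8 m9 m10 mt with
  | nil => simp [PySem.Set.update]
  | cons p l ih =>
    simp only [List.foldl_cons, List.filterMap_cons, pvAltStep, pvMatchIdx]
    split_ifs with h1 h2 h3 h4 h5 h6 <;>
      simp [PySem.Set.update, List.append_assoc, *] <;> first | rfl | simp_all

lemma pvMem_matched (l : List (Int × List Int)) (x : Int) :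
    x ∈ l.filterMap pvMatchIdx ↔
      x ∈ l.filterMap (fun p => if p.2 = ([0, 1] : List Int) then some p.1 else none) ++
          l.filterMap (fun p => if p.2 = ([2, 3] : List Int) then some p.1 else none) ++
          l.filterMap (fun p => if p.2 = ([0, 3] : List Int) then some p.1 else none) ++
          l.filterMap (fun p => if p.2 = ([1, 2] : List Int) then some p.1 else none) ++
          l.filterMap (fun p => if p.2 = ([0, 2, 4] : List Int) then some p.1 else none) ++
          l.filterMap (fun p => if p.2 = ([1, 3, 4] : List Int) then some p.1 else none) := by
  simp only [List.mem_append, List.mem_filterMap, pvMatchIdx, Option.ite_none_right_eq_some,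
    Option.some.injEq]
  aesop

-- ===== VERDICT (by name: the statement is the Claim_ definition above) =====
theorem apply_marker_py_spec : Claim_equal_apply_marker_py := by
  intro l _
  unfold Spec_apply_marker_py apply_marker_py apply_marker_py_alt
  simp only [pvAltStep_foldl, List.nil_append, List.cons.injEq, and_true, true_and]
  apply List.filterMap_congr
  intro p _
  have hiff : (PySem.Set.update PySem.Set.empty (l.filterMap pvMatchIdx)).contains p.1 = true ↔
      p.1 ∈ l.filterMap (fun p => if p.2 = ([0, 1] : List Int) then some p.1 else none) ++
            l.filterMap (fun p => if p.2 = ([2, 3] : List Int) then some p.1 else none) ++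
            l.filterMap (fun p => if p.2 = ([0, 3] : List Int) then some p.1 else none) ++
            l.filterMap (fun p => if p.2 = ([1, 2] : List Int) then some p.1 else none) ++
            l.filterMap (fun p => if p.2 = ([0, 2, 4] : List Int) then some p.1 else none) ++
            l.filterMap (fun p => if p.2 = ([1, 3, 4] : List Int) then some p.1 else none) := by
    have he : PySem.Set.update PySem.Set.empty (l.filterMap pvMatchIdx) =
        PySem.Set.ofList (l.filterMap pvMatchIdx) := rfl
    rw [he, PySem.Set.contains_iff, PySem.Set.mem_ofList, pvMem_matched]
  by_cases hm : p.1 ∈ l.filterMap (fun p => if p.2 = ([0, 1] : List Int) then some p.1 else none) ++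
            l.filterMap (fun p => if p.2 = ([2, 3] : List Int) then some p.1 else none) ++
            l.filterMap (fun p => if p.2 = ([0, 3] : List Int) then some p.1 else none) ++
            l.filterMap (fun p => if p.2 = ([1, 2] : List Int) then some p.1 else none) ++
            l.filterMap (fun p => if p.2 = ([0, 2, 4] : List Int) then some p.1 else none) ++
            l.filterMap (fun p => if p.2 = ([1, 3, 4] : List Int) then some p.1 else none)
  · rw [if_pos hm, if_pos (hiff.mpr hm)]
  · have hc : ¬ ((PySem.Set.update PySem.Set.empty (l.filterMap pvMatchIdx)).contains p.1 = true) :=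
      fun hcc => hm (hiff.mp hcc)
    rw [if_neg hm, if_neg hc]
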